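-- pv_equiv track=rewrite | github.com/mikedavissoftware/rsa-project | archive/entire_project.py | check_rel_prime
-- ===== SOURCE A (Python) =====
-- def EEA(a, b):
--     """
--     This is a helper function utilizing Bezout's theorem as discussed in your MW.
--     You will follow these same steps closely to construct this function.
--
--     This version will return both:
--     1. the GCD of a, b
--     2. Bezout's coefficients in any form you wish. We recommend returning your coefficients as a list or a tuple.
--     HINT: return GCD, (s1, t1)
--
--     * Ensure that your inputs are positive integers. Implement these kinds of checks.
--     * It might also behoove you to consider reassigning a, b to new coefficients depending on which is greater.
--
--     """
--     s1, t1 = 1, 0 #assign the values of 1,0 to s1,t1 respectively, per the setup of the Extended Euclid's Algorithm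
--     s2, t2 = 0, 1 #assign the values of 0,1 to s2,t2 respectively, per the setup of the Extended Euclid's Algorithm
--
--     while b > 0: #similarly to the regular Euclid's Algo, run following loop while the second integer is greater than 0, since any number modulo 0 is undefined
--         k = a % b #initiate variable k at the value of a mod b, which is the same as k from Euclid's (the remainder)
--         q = a // b #initiate variable q at the value of the integer division of a // b, which is the number of times b divides a before a remainder is reached
--
--         a = b #replace the value of a with the value of b, per Euclid's Algo
--         b = k #replace the value of b with the remainder k, per Euclid's Algo
--
--         s3, t3 = (s1 - q * s2), (t1 - q * t2) #initiate s3,t3 (essentially ŝ,t̂ from algo, but python doesn't recognize these symbols) as the calculated values using q...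
--             #...so that we can still reference the original values of s2,t2 in reassignment later
--
--         s1, t1 = s2, t2 #reassign value of s1,t1 to that of s2,t2 per the Extended Euclid's Algo -- these are our new values for the next loop (if b is still > 0)
--         s2, t2 = s3, t3 #reassign value of s2,t2 to the newly calculated values we assigned to s3,t3 -- these are our new values for the next loop (if b is still > 0)
--
--     gcd = a #for clarity, assign the value of a to variable gcd, since once we reach b = 0, we have found our GCD in variable a
--
--     return gcd, (s1, t1) #return the GCD, as well as a tuple containing s1,t1 (our Bezout's coefficients)
--
-- def check_rel_prime(pairs, e):
--     d_vals = []
--     for pair in pairs: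
--         p,q = pair
--         f = (p - 1) * (q - 1)
--         eea = EEA(e, f)
--         if eea[0] == 1:
--             d_vals.append(int(eea[1][0]))
--
--     d_set = set(d_vals)
--     d_list = list(d_set)
--     return d_list
-- ===== SOURCE B (Python) =====
-- def check_rel_prime(pairs, e):
--     def eea(a, b):
--         # recursive extended Euclid with back-substitution
--         if b <= 0:
--             return a, 1, 0
--         g, x, y = eea(b, a % b)
--         return g, y, x - (a // b) * y
--     results = (eea(e, (p - 1) * (q - 1)) for p, q in pairs)
--     return list({x for g, x, _ in results if g == 1})
-- ===== Notes on version B (the rewrite author's own statement) =====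
-- stated objective: alternative
-- what changed: The iterative extended-Euclid loop carrying four forward-accumulated coefficients is replaced by a recursive back-substitution EEA, and the append-in-a-loop collection by a map/filter comprehension dedup'd with a set.
import Mathlib
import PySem

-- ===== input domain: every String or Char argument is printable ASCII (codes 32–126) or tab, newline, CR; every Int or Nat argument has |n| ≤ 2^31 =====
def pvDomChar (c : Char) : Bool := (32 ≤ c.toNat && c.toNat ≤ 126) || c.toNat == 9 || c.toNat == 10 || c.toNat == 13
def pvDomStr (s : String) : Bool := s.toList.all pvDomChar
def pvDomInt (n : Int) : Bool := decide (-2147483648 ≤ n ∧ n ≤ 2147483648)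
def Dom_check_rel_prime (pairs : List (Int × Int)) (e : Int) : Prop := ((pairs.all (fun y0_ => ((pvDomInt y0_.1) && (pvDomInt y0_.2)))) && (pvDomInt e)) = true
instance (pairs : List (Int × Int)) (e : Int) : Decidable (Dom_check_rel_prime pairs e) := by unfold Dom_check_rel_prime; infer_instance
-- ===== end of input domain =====

-- B replaces the iterative forward-accumulation EEA by a recursive back-substitution EEA
-- and the append-loop by a map/filter comprehension (objective: alternative decomposition).


-- ===== PORT A =====
-- the `while b > 0` loop of A's EEA, state (a, b, s1, t1, s2, t2); returns (gcd, s1, t1)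
def EEA_loop (a b s1 t1 s2 t2 : Int) : Int × Int × Int :=
  if h : 0 < b then
    let k := PySem.Int.mod a b
    let q := PySem.Int.floordiv a b
    EEA_loop b k s2 t2 (s1 - q * s2) (t1 - q * t2)
  else
    (a, s1, t1)
termination_by b.toNat
decreasing_by
  have h2 := PySem.Int.mod_lt a h
  omega

-- EEA(a, b) = gcd, (s1, t1): the tuple (gcd, (s1, t1)) is the flat triple here
def EEA (a b : Int) : Int × Int × Int :=
  EEA_loop a b 1 0 0 1

def check_rel_prime (pairs : List (Int × Int)) (e : Int) : List Int :=
  let d_vals := pairs.foldl (fun acc pair =>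
    let f := (pair.1 - 1) * (pair.2 - 1)
    let eea := EEA e f
    if eea.1 == 1 then acc ++ [eea.2.1] else acc) []
  PySem.Set.ofList d_vals

-- ===== PORT B =====
-- recursive extended Euclid with back-substitution; returns (g, x, y)
def eeaRec (a b : Int) : Int × Int × Int :=
  if _h : b ≤ 0 then
    (a, 1, 0)
  else
    let r := eeaRec b (PySem.Int.mod a b)
    (r.1, r.2.2, r.2.1 - PySem.Int.floordiv a b * r.2.2)
termination_by b.toNat
decreasing_by
  have hpos : (0:Int) < b := by omega
  have h2 := PySem.Int.mod_lt a hpos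
  omega

def check_rel_prime_alt (pairs : List (Int × Int)) (e : Int) : List Int :=
  let results := pairs.map (fun pq => eeaRec e ((pq.1 - 1) * (pq.2 - 1)))
  PySem.Set.ofList (((results.filter (fun r => r.1 == 1)).map (fun r => r.2.1)))

-- ===== PRECONDITION & SPEC =====
def Spec_check_rel_prime (pairs : List (Int × Int)) (e : Int) (out : List Int) : Prop := out = check_rel_prime_alt pairs e
instance (pairs : List (Int × Int)) (e : Int) (out : List Int) : Decidable (Spec_check_rel_prime pairs e out) := by unfold Spec_check_rel_prime; infer_instance

-- ===== CLAIM (what is proved, stated in full; the proofs are below) =====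
def Claim_equal_check_rel_prime : Prop := ∀ (pairs : List (Int × Int)) (e : Int), Dom_check_rel_prime pairs e → Spec_check_rel_prime pairs e (check_rel_prime pairs e)

-- ===== LEMMAS AND PROOFS =====

-- linearity invariant: the iterative loop's final coefficients are the recursive
-- back-substitution coefficients combined linearly with the loop's starting state
lemma EEA_loop_eq_lin (n : Nat) : ∀ (a b s1 t1 s2 t2 : Int), b.toNat ≤ n →
    EEA_loop a b s1 t1 s2 t2 =
      ((eeaRec a b).1,
       (eeaRec a b).2.1 * s1 + (eeaRec a b).2.2 * s2,
       (eeaRec a b).2.1 * t1 + (eeaRec a b).2.2 * t2) := by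
  induction n with
  | zero =>
    intro a b s1 t1 s2 t2 hb
    have hb' : b ≤ 0 := by omega
    rw [EEA_loop.eq_def, eeaRec.eq_def]
    simp [not_lt.mpr hb', hb']
  | succ n ih =>
    intro a b s1 t1 s2 t2 hb
    rw [EEA_loop.eq_def, eeaRec.eq_def]
    by_cases hpos : 0 < b
    · have hk1 := PySem.Int.mod_nonneg a hpos
      have hk2 := PySem.Int.mod_lt a hpos
      simp only [hpos, dif_pos, not_le.mpr hpos]
      rw [ih b (PySem.Int.mod a b) _ _ _ _ (by omega)]
      simp only [dif_neg not_false, Prod.mk.injEq]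
      exact ⟨trivial, by ring, by ring⟩
    · have hb' : b ≤ 0 := by omega
      simp [hpos, hb']

lemma EEA_eq_eeaRec (a b : Int) : EEA a b = eeaRec a b := by
  rw [EEA, EEA_loop_eq_lin b.toNat a b 1 0 0 1 (le_refl _)]
  simp

-- ===== VERDICT (by name: the statement is the Claim_ definition above) =====
theorem check_rel_prime_spec : Claim_equal_check_rel_prime := by
  intro pairs e _
  unfold Spec_check_rel_prime check_rel_prime check_rel_prime_alt
  simp only [EEA_eq_eeaRec]
  rw [List.filter_map, List.map_map]
  simp only [PySem.List.foldl_append_if]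
  rfl
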